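-- pv_equiv track=rewrite | github.com/yanniedog/prediction | copyscripts.py | extract_relevant_log_section
-- ===== SOURCE A (Python) =====
-- def extract_relevant_log_section(log_content):
--     """
--     Extracts the log section starting three lines above the first occurrence
--     of 'ERROR' or 'Traceback' (whichever comes first) and continues to the end.
--     """
--     lines = log_content.split('\n')
--     error_indices = [i for i, line in enumerate(lines) if 'ERROR' in line]
--     traceback_indices = [i for i, line in enumerate(lines) if 'Traceback' in line]
--
--     first_error = error_indices[0] if error_indices else None
--     first_traceback = traceback_indices[0] if traceback_indices else None
--
--     # Determine which comes first
--     if first_error is not None and (first_traceback is None or first_error < first_traceback):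
--         start_index = max(first_error - 3, 0)
--     elif first_traceback is not None:
--         start_index = max(first_traceback - 3, 0)
--     else:
--         # If neither ERROR nor Traceback is found, return the entire log
--         return log_content
--
--     # Join the lines from start_index to the end
--     relevant_log = '\n'.join(lines[start_index:])
--     return relevant_log
-- ===== SOURCE B (Python) =====
-- def extract_relevant_log_section(log_content):
--     lines = log_content.split('\n')
--     for i, line in enumerate(lines):
--         if 'ERROR' in line or 'Traceback' in line:
--             return '\n'.join(lines[max(i - 3, 0):])
--     return log_content
-- ===== Notes on version B (the rewrite author's own statement) =====
-- stated objective: simpler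
-- what changed: Replaces the two full comprehension passes building complete ERROR/Traceback index lists plus the first-index comparison with a single indexed scan that returns at the first line containing either marker.
import Mathlib
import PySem

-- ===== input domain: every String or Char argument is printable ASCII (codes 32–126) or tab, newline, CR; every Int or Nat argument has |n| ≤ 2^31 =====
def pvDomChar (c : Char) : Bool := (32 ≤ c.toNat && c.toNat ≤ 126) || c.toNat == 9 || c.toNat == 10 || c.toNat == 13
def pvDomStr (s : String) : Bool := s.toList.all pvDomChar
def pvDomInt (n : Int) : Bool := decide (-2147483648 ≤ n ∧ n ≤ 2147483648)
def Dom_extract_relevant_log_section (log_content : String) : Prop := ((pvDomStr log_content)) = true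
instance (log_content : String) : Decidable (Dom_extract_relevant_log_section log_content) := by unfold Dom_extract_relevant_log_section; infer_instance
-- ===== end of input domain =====

-- B replaces A's two full index-list passes by one indexed scan returning at the first marker line (simpler decomposition).

-- ===== PORT A =====
def extract_relevant_log_section (log_content : String) : String :=
  let lines := (PySem.Str.split? log_content "\n").getD []
  let error_indices := ((PySem.List.enumerate lines).filter (fun p => PySem.Str.isIn "ERROR" p.2)).map (fun p => p.1)
  let traceback_indices := ((PySem.List.enumerate lines).filter (fun p => PySem.Str.isIn "Traceback" p.2)).map (fun p => p.1)
  let first_error := error_indices.head?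
  let first_traceback := traceback_indices.head?
  -- the if / elif / else chain on first_error / first_traceback, computing start_index or returning early
  match
    (match first_error, first_traceback with
     | some e, some t => if e < t then some (max (e - 3) 0) else some (max (t - 3) 0)
     | some e, none => some (max (e - 3) 0)
     | none, some t => some (max (t - 3) 0)
     | none, none => none) with
  | some start_index => PySem.Str.join "\n" (PySem.List.slice lines (some start_index) none)
  | none => log_content

-- ===== PORT B =====
-- the 'for i, line in enumerate(lines): if … return' loop of Source B
def pvFirstHit : List String → Int → Option Int
  | [], _ => none
  | l :: rest, i =>
      if PySem.Str.isIn "ERROR" l || PySem.Str.isIn "Traceback" l then some i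
      else pvFirstHit rest (i + 1)

def extract_relevant_log_section_alt (log_content : String) : String :=
  let lines := (PySem.Str.split? log_content "\n").getD []
  match pvFirstHit lines 0 with
  | some i => PySem.Str.join "\n" (PySem.List.slice lines (some (max (i - 3) 0)) none)
  | none => log_content

-- ===== PRECONDITION & SPEC =====
def Spec_extract_relevant_log_section (log_content : String) (out : String) : Prop := out = extract_relevant_log_section_alt log_content
instance (log_content : String) (out : String) : Decidable (Spec_extract_relevant_log_section log_content out) := by unfold Spec_extract_relevant_log_section; infer_instance

-- ===== CLAIM (what is proved, stated in full; the proofs are below) =====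
def Claim_equal_extract_relevant_log_section : Prop := ∀ (log_content : String), Dom_extract_relevant_log_section log_content → Spec_extract_relevant_log_section log_content (extract_relevant_log_section log_content)

-- ===== LEMMAS AND PROOFS =====

-- first indices of the two filtered enumerations, merged by min
def pvMin2 : Option Int → Option Int → Option Int
  | some a, some b => some (min a b)
  | some a, none => some a
  | none, o => o

def pvIdxOf (p : String → Bool) (xs : List String) (s : Int) : Option Int :=
  (((PySem.List.enumerate xs s).filter (fun q => p q.2)).map (fun q => q.1)).head?

theorem pvIdxOf_nil (p : String → Bool) (s : Int) : pvIdxOf p [] s = none := by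
  simp [pvIdxOf, PySem.List.enumerate_nil]

theorem pvIdxOf_cons_pos (p : String → Bool) (l : String) (rest : List String) (s : Int)
    (h : p l = true) : pvIdxOf p (l :: rest) s = some s := by
  simp only [pvIdxOf, PySem.List.enumerate_cons]
  rw [List.filter_cons_of_pos (by simpa using h)]
  simp

theorem pvIdxOf_cons_neg (p : String → Bool) (l : String) (rest : List String) (s : Int)
    (h : p l = false) : pvIdxOf p (l :: rest) s = pvIdxOf p rest (s + 1) := by
  simp only [pvIdxOf, PySem.List.enumerate_cons]
  rw [List.filter_cons_of_neg (by simp [h])]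

theorem pvIdxOf_ge (p : String → Bool) (xs : List String) (s x : Int)
    (h : pvIdxOf p xs s = some x) : s ≤ x := by
  have hx : x ∈ ((PySem.List.enumerate xs s).filter (fun q => p q.2)).map (fun q => q.1) :=
    List.mem_of_mem_head? (show x ∈ _ from by unfold pvIdxOf at h; exact h)
  simp only [List.mem_map, List.mem_filter, PySem.List.mem_enumerate_iff] at hx
  obtain ⟨q, ⟨⟨k, hk, rfl⟩, -⟩, rfl⟩ := hx
  omega

theorem pvFirstHit_eq (xs : List String) : ∀ s : Int,
    pvFirstHit xs s =
      pvMin2 (pvIdxOf (fun l => PySem.Str.isIn "ERROR" l) xs s)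
             (pvIdxOf (fun l => PySem.Str.isIn "Traceback" l) xs s) := by
  induction xs with
  | nil => intro s; simp [pvFirstHit, pvIdxOf_nil, pvMin2]
  | cons l rest ih =>
    intro s
    by_cases he : PySem.Str.isIn "ERROR" l = true <;>
    by_cases ht : PySem.Str.isIn "Traceback" l = true
    · rw [pvIdxOf_cons_pos _ _ _ _ he, pvIdxOf_cons_pos _ _ _ _ ht]
      simp only [pvFirstHit, he, ht, Bool.true_or, if_true, pvMin2, min_self]
    · rw [pvIdxOf_cons_pos _ _ _ _ he,
          pvIdxOf_cons_neg _ _ _ _ (by simpa using ht)]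
      simp only [pvFirstHit, he, Bool.true_or, if_true]
      cases h : pvIdxOf (fun l => PySem.Str.isIn "Traceback" l) rest (s + 1) with
      | none => simp [pvMin2]
      | some t =>
          have := pvIdxOf_ge _ _ _ _ h
          simp only [pvMin2]
          congr 1
          omega
    · rw [pvIdxOf_cons_neg _ _ _ _ (by simpa using he),
          pvIdxOf_cons_pos _ _ _ _ ht]
      simp only [pvFirstHit, he, ht, Bool.false_or, if_true]
      cases h : pvIdxOf (fun l => PySem.Str.isIn "ERROR" l) rest (s + 1) with
      | none => simp [pvMin2]
      | some e =>
          have := pvIdxOf_ge _ _ _ _ h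
          simp only [pvMin2]
          congr 1
          omega
    · rw [pvIdxOf_cons_neg _ _ _ _ (by simpa using he),
          pvIdxOf_cons_neg _ _ _ _ (by simpa using ht)]
      simp only [pvFirstHit, he, ht, Bool.or_self]
      exact ih (s + 1)

-- ===== VERDICT (by name: the statement is the Claim_ definition above) =====
theorem extract_relevant_log_section_spec : Claim_equal_extract_relevant_log_section := by
  intro log_content _
  unfold Spec_extract_relevant_log_section extract_relevant_log_section extract_relevant_log_section_alt
  dsimp only
  rw [pvFirstHit_eq]
  cases he : pvIdxOf (fun l => PySem.Str.isIn "ERROR" l) ((PySem.Str.split? log_content "\n").getD []) 0 with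
  | none =>
    cases ht : pvIdxOf (fun l => PySem.Str.isIn "Traceback" l) ((PySem.Str.split? log_content "\n").getD []) 0 with
    | none => simp only [pvIdxOf] at he ht; rw [he, ht]; rfl
    | some t => simp only [pvIdxOf] at he ht; rw [he, ht]; rfl
  | some e =>
    cases ht : pvIdxOf (fun l => PySem.Str.isIn "Traceback" l) ((PySem.Str.split? log_content "\n").getD []) 0 with
    | none => simp only [pvIdxOf] at he ht; rw [he, ht]; rfl
    | some t =>
      simp only [pvIdxOf] at he ht; rw [he, ht]
      by_cases hlt : e < t
      · simp only [pvMin2, if_pos hlt, min_eq_left (le_of_lt hlt)]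
      · simp only [pvMin2, if_neg hlt, min_eq_right (by omega : t ≤ e)]
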